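-- pv_equiv track=rewrite | github.com/JanBanasik/Kompilatory | Skaner/MathematicalExpression.py | skaner
-- ===== SOURCE A (Python) =====
-- automata = {
--     0: {'cyfra': 1,
--         'nawias': 3,
--         'operator': 5},
--
--     1: {'cyfra': 1,
--         'inne': 2},
--
--     3: {'inne': 4},
--
--     5: {'inne': 6}
-- }
--
-- stanyKoncowe = {2: 'LiczbaCalkowita',
--                 4: 'Nawias',
--                 6: 'Operator'}
--
-- def klasyfikuj(znak: str) -> str:
--     if znak.isdigit():
--         return 'cyfra'
--     elif znak in ['(', ')']:
--         return 'nawias'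
--     elif znak in ['+', '-', '*', '/']:
--         return 'operator'
--     return 'inne'
--
-- def skaner(expression: str) -> tuple[str, str]:
--     stan = 0
--     token: str = ""
--     endOfExpr: bool = True
--     for index in range(len(expression)):
--         if expression[index].isspace():
--             continue
--         klasyfikacja = klasyfikuj(expression[index])
--         if klasyfikacja not in automata[stan]:
--             klasyfikacja = 'inne'
--         stan = automata[stan][klasyfikacja]
--         if stan in stanyKoncowe:
--             endOfExpr = False
--             break
--         token += expression[index]
--
--     if endOfExpr:
--         stan = automata[stan]['inne']
--     return stanyKoncowe[stan], token
-- ===== SOURCE B (Python) =====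
-- def skaner(expression: str) -> tuple[str, str]:
--     names = {'cyfra': 'LiczbaCalkowita', 'nawias': 'Nawias', 'operator': 'Operator'}
--     chars = [c for c in expression if not c.isspace()]
--     kind = 'inne'
--     token = ''
--     if chars:
--         c = chars[0]
--         if c.isdigit():
--             kind = 'cyfra'
--             i = 0
--             while i < len(chars) and chars[i].isdigit():
--                 i += 1
--             token = ''.join(chars[:i])
--         elif c in '()':
--             kind, token = 'nawias', c
--         elif c in '+-*/':
--             kind, token = 'operator', c
--     return names[kind], token
-- ===== Notes on version B (the rewrite author's own statement) =====
-- stated objective: simpler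
-- what changed: Replaces the DFA transition-table (automata dict + integer state + final-state dict) with a direct scanner: filter out whitespace once, classify the first remaining character, take the digit prefix or the single bracket/operator character, and look the type name up in one small dict.
import Mathlib
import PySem

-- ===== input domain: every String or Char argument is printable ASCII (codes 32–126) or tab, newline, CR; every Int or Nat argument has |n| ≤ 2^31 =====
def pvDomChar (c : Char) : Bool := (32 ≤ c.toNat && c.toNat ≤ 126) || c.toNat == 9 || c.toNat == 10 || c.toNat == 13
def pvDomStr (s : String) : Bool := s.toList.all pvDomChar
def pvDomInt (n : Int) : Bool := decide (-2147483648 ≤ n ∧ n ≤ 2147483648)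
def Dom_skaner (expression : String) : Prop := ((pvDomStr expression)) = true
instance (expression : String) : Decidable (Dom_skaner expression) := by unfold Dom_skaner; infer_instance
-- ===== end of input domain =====

-- B replaces the table-driven DFA with a filter-then-classify scanner (simpler decomposition, same cost).

-- ===== PORT A =====
def automata : PySem.Dict Int (PySem.Dict String Int) :=
  PySem.Dict.ofList
    [ (0, PySem.Dict.ofList [("cyfra", 1), ("nawias", 3), ("operator", 5)]),
      (1, PySem.Dict.ofList [("cyfra", 1), ("inne", 2)]),
      (3, PySem.Dict.ofList [("inne", 4)]),
      (5, PySem.Dict.ofList [("inne", 6)]) ]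

def stanyKoncowe : PySem.Dict Int String :=
  PySem.Dict.ofList [(2, "LiczbaCalkowita"), (4, "Nawias"), (6, "Operator")]

def klasyfikuj (znak : Char) : String :=
  if PySem.Chars.isdigit znak then "cyfra"
  else if znak = '(' ∨ znak = ')' then "nawias"
  else if znak = '+' ∨ znak = '-' ∨ znak = '*' ∨ znak = '/' then "operator"
  else "inne"

-- the for-loop of A: state stan, token; returns none where Python raises KeyError,
-- otherwise some (stan, token, endOfExpr) at loop exit (endOfExpr = false means 'break')
def skanerLoop : List Char → Int → List Char → Option (Int × List Char × Bool)
  | [], stan, token => some (stan, token, true)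
  | c :: rest, stan, token =>
    if PySem.Chars.isspace c then skanerLoop rest stan token
    else
      match automata.get? stan with
      | none => none
      | some row =>
        let klasyfikacja := klasyfikuj c
        let klasyfikacja := if (row.get? klasyfikacja).isSome then klasyfikacja else "inne"
        match row.get? klasyfikacja with
        | none => none
        | some stan' =>
          if (stanyKoncowe.get? stan').isSome then some (stan', token, false)
          else skanerLoop rest stan' (token ++ [c])

def skanerCore (l : List Char) : Option (String × String) :=
  match skanerLoop l 0 [] with
  | none => none
  | some (stan, token, endOfExpr) =>
    match (if endOfExpr then (automata.get? stan).bind (fun row => row.get? "inne") else some stan) with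
    | none => none
    | some stan' =>
      match stanyKoncowe.get? stan' with
      | none => none
      | some name => some (name, String.mk token)

def skaner (expression : String) : String × String :=
  (skanerCore expression.toList).getD ("", "")

-- ===== PORT B =====
def namesB : PySem.Dict String String :=
  PySem.Dict.ofList [("cyfra", "LiczbaCalkowita"), ("nawias", "Nawias"), ("operator", "Operator")]

-- the while-loop of Source B: length of the digit prefix
def digitPrefixLen : List Char → Nat
  | [] => 0
  | c :: rest => if PySem.Chars.isdigit c then digitPrefixLen rest + 1 else 0

def skanerAltCore (l : List Char) : Option (String × String) :=
  let chars := l.filter (fun c => !(PySem.Chars.isspace c))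
  let kt : String × List Char :=
    match chars with
    | [] => ("inne", [])
    | c :: _ =>
      if PySem.Chars.isdigit c then ("cyfra", chars.take (digitPrefixLen chars))
      else if c = '(' ∨ c = ')' then ("nawias", [c])
      else if c = '+' ∨ c = '-' ∨ c = '*' ∨ c = '/' then ("operator", [c])
      else ("inne", [])
  (namesB.get? kt.1).map (fun n => (n, String.mk kt.2))

def skaner_alt (expression : String) : String × String :=
  (skanerAltCore expression.toList).getD ("", "")

-- ===== PRECONDITION & SPEC =====
-- Pre_ excludes exactly the inputs on which A raises KeyError('inne'): strings whose
-- first non-whitespace character is missing (empty / all-space) or is not a digit,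
-- parenthesis or +-*/ operator.  B raises the same KeyError there.
def pvRecog (c : Char) : Bool :=
  PySem.Chars.isdigit c || c = '(' || c = ')' || c = '+' || c = '-' || c = '*' || c = '/'

def Pre_skaner (expression : String) : Prop :=
  pvRecog ((expression.toList.filter (fun c => !(PySem.Chars.isspace c))).headD ' ') = true
instance (expression : String) : Decidable (Pre_skaner expression) := by unfold Pre_skaner; infer_instance

def pvWitness_skaner : String := " 12+"

def Spec_skaner (expression : String) (out : String × String) : Prop := out = skaner_alt expression
instance (expression : String) (out : String × String) : Decidable (Spec_skaner expression out) := by unfold Spec_skaner; infer_instance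

-- ===== CLAIM (what is proved, stated in full; the proofs are below) =====
def Claim_equal_skaner : Prop := ∀ (expression : String), Dom_skaner expression → Pre_skaner expression → Spec_skaner expression (skaner expression)

-- ===== LEMMAS AND PROOFS =====

lemma klas_cases (c : Char) :
    klasyfikuj c = "cyfra" ∨ klasyfikuj c = "nawias" ∨ klasyfikuj c = "operator" ∨ klasyfikuj c = "inne" := by
  unfold klasyfikuj; split_ifs <;> simp

lemma loop3 (chars : List Char) (token : List Char) :
    skanerLoop chars 3 token =
      some (if chars.filter (fun c => !(PySem.Chars.isspace c)) = [] then (3, token, true) else ((4 : Int), token, false)) := by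
  induction chars with
  | nil => simp [skanerLoop]
  | cons c rest ih =>
    by_cases hsp : PySem.Chars.isspace c
    · simp [skanerLoop, hsp, ih]
    · have hstep : skanerLoop (c :: rest) 3 token = some (4, token, false) := by
        rcases klas_cases c with h | h | h | h <;>
          (simp only [skanerLoop, hsp, Bool.false_eq_true, if_false, h]; exact rfl)
      rw [hstep]
      simp [hsp]

lemma loop5 (chars : List Char) (token : List Char) :
    skanerLoop chars 5 token =
      some (if chars.filter (fun c => !(PySem.Chars.isspace c)) = [] then (5, token, true) else ((6 : Int), token, false)) := by
  induction chars with
  | nil => simp [skanerLoop]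
  | cons c rest ih =>
    by_cases hsp : PySem.Chars.isspace c
    · simp [skanerLoop, hsp, ih]
    · have hstep : skanerLoop (c :: rest) 5 token = some (6, token, false) := by
        rcases klas_cases c with h | h | h | h <;>
          (simp only [skanerLoop, hsp, Bool.false_eq_true, if_false, h]; exact rfl)
      rw [hstep]
      simp [hsp]

lemma loop1 (chars : List Char) (token : List Char) :
    skanerLoop chars 1 token =
      some (if (chars.filter (fun c => !(PySem.Chars.isspace c))).all PySem.Chars.isdigit
            then ((1 : Int), token ++ (chars.filter (fun c => !(PySem.Chars.isspace c))).takeWhile PySem.Chars.isdigit, true)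
            else ((2 : Int), token ++ (chars.filter (fun c => !(PySem.Chars.isspace c))).takeWhile PySem.Chars.isdigit, false)) := by
  induction chars generalizing token with
  | nil => simp [skanerLoop]
  | cons c rest ih =>
    by_cases hsp : PySem.Chars.isspace c
    · simp [skanerLoop, hsp, ih]
    · by_cases hd : PySem.Chars.isdigit c
      · have hkl : klasyfikuj c = "cyfra" := by simp [klasyfikuj, hd]
        have hstep : skanerLoop (c :: rest) 1 token = skanerLoop rest 1 (token ++ [c]) := by
          simp only [skanerLoop, hsp, Bool.false_eq_true, if_false, hkl]
          exact rfl
        rw [hstep, ih]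
        simp [hsp, hd]
      · have hkl : klasyfikuj c = "nawias" ∨ klasyfikuj c = "operator" ∨ klasyfikuj c = "inne" := by
          simp only [klasyfikuj, hd]
          split_ifs <;> simp_all
        have hstep : skanerLoop (c :: rest) 1 token = some (2, token, false) := by
          rcases hkl with h | h | h <;>
            (simp only [skanerLoop, hsp, Bool.false_eq_true, if_false, h]; exact rfl)
        rw [hstep]
        simp [hsp, hd]

lemma take_dpl (l : List Char) : l.take (digitPrefixLen l) = l.takeWhile PySem.Chars.isdigit := by
  induction l with
  | nil => rfl
  | cons c rest ih =>
    by_cases hd : PySem.Chars.isdigit c <;> simp [digitPrefixLen, hd, ih]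

lemma branchA_dig (c : Char) (rest : List Char) (hsp : PySem.Chars.isspace c = false)
    (hkl : klasyfikuj c = "cyfra") :
    skanerCore (c :: rest) =
      some ("LiczbaCalkowita", String.mk ([c] ++ (rest.filter (fun c => !(PySem.Chars.isspace c))).takeWhile PySem.Chars.isdigit)) := by
  have hstep : skanerLoop (c :: rest) 0 [] = skanerLoop rest 1 [c] := by
    simp only [skanerLoop, hsp, Bool.false_eq_true, if_false, hkl]; exact rfl
  unfold skanerCore
  rw [hstep, loop1]
  split_ifs <;> exact rfl

lemma branchA_naw (c : Char) (rest : List Char) (hsp : PySem.Chars.isspace c = false)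
    (hkl : klasyfikuj c = "nawias") :
    skanerCore (c :: rest) = some ("Nawias", String.mk [c]) := by
  have hstep : skanerLoop (c :: rest) 0 [] = skanerLoop rest 3 [c] := by
    simp only [skanerLoop, hsp, Bool.false_eq_true, if_false, hkl]; exact rfl
  unfold skanerCore
  rw [hstep, loop3]
  split_ifs <;> exact rfl

lemma branchA_op (c : Char) (rest : List Char) (hsp : PySem.Chars.isspace c = false)
    (hkl : klasyfikuj c = "operator") :
    skanerCore (c :: rest) = some ("Operator", String.mk [c]) := by
  have hstep : skanerLoop (c :: rest) 0 [] = skanerLoop rest 5 [c] := by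
    simp only [skanerLoop, hsp, Bool.false_eq_true, if_false, hkl]; exact rfl
  unfold skanerCore
  rw [hstep, loop5]
  split_ifs <;> exact rfl

lemma core_eq (l : List Char)
    (h : pvRecog ((l.filter (fun c => !(PySem.Chars.isspace c))).headD ' ') = true) :
    skanerCore l = skanerAltCore l := by
  induction l with
  | nil => exact absurd h (by decide)
  | cons c rest ih =>
    by_cases hsp : PySem.Chars.isspace c
    · have hfc : List.filter (fun c => !(PySem.Chars.isspace c)) (c :: rest)
          = List.filter (fun c => !(PySem.Chars.isspace c)) rest := by simp [hsp]
      have hA : skanerCore (c :: rest) = skanerCore rest := by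
        unfold skanerCore
        simp only [skanerLoop, hsp, if_true]
      have hB : skanerAltCore (c :: rest) = skanerAltCore rest := by
        unfold skanerAltCore
        rw [hfc]
      rw [hA, hB]
      exact ih (by rwa [hfc] at h)
    · have hspf : PySem.Chars.isspace c = false := by simpa using hsp
      have hfc : List.filter (fun c => !(PySem.Chars.isspace c)) (c :: rest)
          = c :: List.filter (fun c => !(PySem.Chars.isspace c)) rest := by simp [hspf]
      rw [hfc] at h
      simp only [List.headD_cons] at h
      by_cases hd : PySem.Chars.isdigit c
      · have hkl : klasyfikuj c = "cyfra" := by simp [klasyfikuj, hd]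
        rw [branchA_dig c rest hspf hkl]
        unfold skanerAltCore
        rw [hfc]
        simp [hd, take_dpl]
        rfl
      · have hc : c = '(' ∨ c = ')' ∨ c = '+' ∨ c = '-' ∨ c = '*' ∨ c = '/' := by
          simp [pvRecog, hd] at h
          tauto
        rcases hc with hc | hc | hc | hc | hc | hc
        · have hkl : klasyfikuj c = "nawias" := by subst hc; rfl
          rw [branchA_naw c rest hspf hkl]
          unfold skanerAltCore
          rw [hfc]
          subst hc
          exact rfl
        · have hkl : klasyfikuj c = "nawias" := by subst hc; rfl
          rw [branchA_naw c rest hspf hkl]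
          unfold skanerAltCore
          rw [hfc]
          subst hc
          exact rfl
        · have hkl : klasyfikuj c = "operator" := by subst hc; rfl
          rw [branchA_op c rest hspf hkl]
          unfold skanerAltCore
          rw [hfc]
          subst hc
          exact rfl
        · have hkl : klasyfikuj c = "operator" := by subst hc; rfl
          rw [branchA_op c rest hspf hkl]
          unfold skanerAltCore
          rw [hfc]
          subst hc
          exact rfl
        · have hkl : klasyfikuj c = "operator" := by subst hc; rfl
          rw [branchA_op c rest hspf hkl]
          unfold skanerAltCore
          rw [hfc]
          subst hc
          exact rfl
        · have hkl : klasyfikuj c = "operator" := by subst hc; rfl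
          rw [branchA_op c rest hspf hkl]
          unfold skanerAltCore
          rw [hfc]
          subst hc
          exact rfl

-- ===== VERDICT (by name: the statement is the Claim_ definition above) =====
theorem skaner_spec : Claim_equal_skaner := by
  intro expression _ hpre
  unfold Spec_skaner skaner skaner_alt
  rw [core_eq expression.toList hpre]
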